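-- pv_equiv track=rewrite | github.com/kherrera6219/DataLogicEngine | knowledge_algorithms/ka_07_regulatory_expert_simulation.py | _generate_regulatory_guidance
-- ===== SOURCE A (Python) =====
-- from typing import Dict, List, Any, Optional, Set
--
-- def _generate_regulatory_guidance(query: str, domain: str, regulations: List[Dict[str, Any]]) -> str:
--     """
--     Generate regulatory guidance based on the analysis.
--
--     Args:
--         query: The query text
--         domain: The domain context
--         regulations: Applicable regulations
--
--     Returns:
--         Regulatory guidance text
--     """
--     # Structure guidance based on domain and regulations
--     if not regulations:
--         return "No specific regulatory guidance available for this query."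
--
--     # Create a structured guidance response
--     guidance = [
--         f"Based on a regulatory analysis in the {domain} domain, the following guidance is provided:"
--     ]
--
--     # Add critical regulations first
--     critical_regs = [r for r in regulations if r["relevance"] == "critical"]
--     if critical_regs:
--         guidance.append("\nCritical Regulatory Considerations:")
--         for reg in critical_regs:
--             guidance.append(f"- {reg['code']}: {reg['title']} - This regulation directly applies to your query")
--
--     # Add high relevance regulations
--     high_regs = [r for r in regulations if r["relevance"] == "high"]
--     if high_regs:
--         guidance.append("\nPrimary Regulatory Considerations:")
--         for reg in high_regs[:3]:  # Limit to top 3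
--             guidance.append(f"- {reg['code']}: {reg['title']}")
--
--     # Add domain-specific guidance
--     if domain == "healthcare":
--         guidance.append("\nHealthcare Regulatory Advisory:")
--         guidance.append("- Ensure all patient data handling complies with privacy regulations")
--         guidance.append("- Maintain documentation of compliance efforts")
--         guidance.append("- Consider consulting with a healthcare compliance specialist")
--
--     elif domain == "finance":
--         guidance.append("\nFinancial Regulatory Advisory:")
--         guidance.append("- Verify all disclosure requirements are satisfied")
--         guidance.append("- Maintain audit trail of compliance decisions")
--         guidance.append("- Consider regulatory reporting obligations")
--
--     elif domain == "aerospace":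
--         guidance.append("\nAerospace Regulatory Advisory:")
--         guidance.append("- Ensure all safety requirements are fully addressed")
--         guidance.append("- Maintain documentation of testing and verification")
--         guidance.append("- Consider certification requirements early in development")
--
--     elif domain == "technology":
--         guidance.append("\nTechnology Regulatory Advisory:")
--         guidance.append("- Address data privacy and security requirements")
--         guidance.append("- Consider cross-jurisdictional compliance obligations")
--         guidance.append("- Implement monitoring for regulatory changes")
--
--     # General guidance for all domains
--     guidance.append("\nGeneral Regulatory Recommendations:")
--     guidance.append("- Establish a compliance monitoring process")
--     guidance.append("- Document regulatory interpretations and compliance decisions")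
--     guidance.append("- Consider engaging regulatory specialists for complex matters")
--
--     return "\n".join(guidance)
-- ===== SOURCE B (Python) =====
-- # Fused single pass with string accumulators: no intermediate lists, no join.
-- ADVISORIES = (
--     ("healthcare",
--      "\n\nHealthcare Regulatory Advisory:"
--      "\n- Ensure all patient data handling complies with privacy regulations"
--      "\n- Maintain documentation of compliance efforts"
--      "\n- Consider consulting with a healthcare compliance specialist"),
--     ("finance",
--      "\n\nFinancial Regulatory Advisory:"
--      "\n- Verify all disclosure requirements are satisfied"
--      "\n- Maintain audit trail of compliance decisions"
--      "\n- Consider regulatory reporting obligations"),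
--     ("aerospace",
--      "\n\nAerospace Regulatory Advisory:"
--      "\n- Ensure all safety requirements are fully addressed"
--      "\n- Maintain documentation of testing and verification"
--      "\n- Consider certification requirements early in development"),
--     ("technology",
--      "\n\nTechnology Regulatory Advisory:"
--      "\n- Address data privacy and security requirements"
--      "\n- Consider cross-jurisdictional compliance obligations"
--      "\n- Implement monitoring for regulatory changes"),
-- )
--
--
-- def _generate_regulatory_guidance(query, domain, regulations):
--     """One fused pass over the regulations accumulating both section bodies as
--     strings (with a counter capping the high-relevance section at 3), then
--     direct string concatenation; no intermediate lists and no join."""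
--     if not regulations:
--         return "No specific regulatory guidance available for this query."
--
--     crit = ""
--     high = ""
--     seen_high = 0
--     for r in regulations:
--         rel = r["relevance"]
--         if rel == "critical":
--             crit += ("\n- " + r["code"] + ": " + r["title"]
--                      + " - This regulation directly applies to your query")
--         elif rel == "high":
--             if seen_high < 3:
--                 high += "\n- " + r["code"] + ": " + r["title"]
--             seen_high += 1
--
--     out = ("Based on a regulatory analysis in the " + domain
--            + " domain, the following guidance is provided:")
--     if crit:
--         out += "\n\nCritical Regulatory Considerations:" + crit
--     if high:
--         out += "\n\nPrimary Regulatory Considerations:" + high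
--     for d, advisory in ADVISORIES:
--         if d == domain:
--             out += advisory
--             break
--     out += ("\n\nGeneral Regulatory Recommendations:"
--             "\n- Establish a compliance monitoring process"
--             "\n- Document regulatory interpretations and compliance decisions"
--             "\n- Consider engaging regulatory specialists for complex matters")
--     return out
-- ===== Notes on version B (the rewrite author's own statement) =====
-- stated objective: alternative
-- what changed: B replaces A's two filter passes, list-of-lines and join by one fused pass over the regulations that accumulates both section bodies directly as strings (a counter caps the high section at 3) and assembles the result by plain concatenation, with the domain advisory found by scanning a (domain, text) table.
import Mathlib
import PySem

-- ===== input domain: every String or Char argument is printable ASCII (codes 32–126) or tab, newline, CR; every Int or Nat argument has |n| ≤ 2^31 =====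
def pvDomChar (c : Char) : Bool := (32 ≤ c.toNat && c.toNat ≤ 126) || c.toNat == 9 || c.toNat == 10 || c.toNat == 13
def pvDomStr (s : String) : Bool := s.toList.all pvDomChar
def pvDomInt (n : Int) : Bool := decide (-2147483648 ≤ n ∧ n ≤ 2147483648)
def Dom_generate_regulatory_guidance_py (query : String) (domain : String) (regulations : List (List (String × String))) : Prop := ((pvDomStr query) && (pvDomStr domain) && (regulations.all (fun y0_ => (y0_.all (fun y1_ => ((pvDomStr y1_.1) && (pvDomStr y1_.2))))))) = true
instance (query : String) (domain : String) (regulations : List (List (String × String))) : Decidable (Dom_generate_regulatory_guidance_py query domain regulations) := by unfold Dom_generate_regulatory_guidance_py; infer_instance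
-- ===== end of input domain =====

-- B fuses A's two filter passes, list-of-lines and join into one pass that accumulates the
-- section bodies directly as strings; same asymptotic cost, equivalence proved on Pre_.

-- shared helper: Python's r[k] on an association-list dict (first match; Pre_ rules out KeyError)
def pvGet (r : List (String × String)) (k : String) : String := (List.lookup k r).getD ""
def pvHas (r : List (String × String)) (k : String) : Bool := (List.lookup k r).isSome

-- ===== PORT A =====
def generate_regulatory_guidance_py (query : String) (domain : String) (regulations : List (List (String × String))) : String :=
  if regulations.isEmpty then "No specific regulatory guidance available for this query."
  else
    let guidance : List String :=
      ["Based on a regulatory analysis in the " ++ domain ++ " domain, the following guidance is provided:"]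
    let critical_regs := regulations.filter (fun r => pvGet r "relevance" == "critical")
    let guidance :=
      if critical_regs.isEmpty then guidance else
        guidance ++ ["\nCritical Regulatory Considerations:"] ++
          critical_regs.map (fun reg =>
            "- " ++ pvGet reg "code" ++ ": " ++ pvGet reg "title" ++ " - This regulation directly applies to your query")
    let high_regs := regulations.filter (fun r => pvGet r "relevance" == "high")
    let guidance :=
      if high_regs.isEmpty then guidance else
        guidance ++ ["\nPrimary Regulatory Considerations:"] ++
          (high_regs.take 3).map (fun reg => "- " ++ pvGet reg "code" ++ ": " ++ pvGet reg "title")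
    let guidance :=
      if domain == "healthcare" then
        guidance ++ ["\nHealthcare Regulatory Advisory:",
          "- Ensure all patient data handling complies with privacy regulations",
          "- Maintain documentation of compliance efforts",
          "- Consider consulting with a healthcare compliance specialist"]
      else if domain == "finance" then
        guidance ++ ["\nFinancial Regulatory Advisory:",
          "- Verify all disclosure requirements are satisfied",
          "- Maintain audit trail of compliance decisions",
          "- Consider regulatory reporting obligations"]
      else if domain == "aerospace" then
        guidance ++ ["\nAerospace Regulatory Advisory:",
          "- Ensure all safety requirements are fully addressed",
          "- Maintain documentation of testing and verification",
          "- Consider certification requirements early in development"]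
      else if domain == "technology" then
        guidance ++ ["\nTechnology Regulatory Advisory:",
          "- Address data privacy and security requirements",
          "- Consider cross-jurisdictional compliance obligations",
          "- Implement monitoring for regulatory changes"]
      else guidance
    let guidance := guidance ++ ["\nGeneral Regulatory Recommendations:",
      "- Establish a compliance monitoring process",
      "- Document regulatory interpretations and compliance decisions",
      "- Consider engaging regulatory specialists for complex matters"]
    PySem.Str.join "\n" guidance

-- ===== PORT B =====
def pvAdvisories : List (String × String) := [
  ("healthcare",
   "\n\nHealthcare Regulatory Advisory:\n- Ensure all patient data handling complies with privacy regulations\n- Maintain documentation of compliance efforts\n- Consider consulting with a healthcare compliance specialist"),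
  ("finance",
   "\n\nFinancial Regulatory Advisory:\n- Verify all disclosure requirements are satisfied\n- Maintain audit trail of compliance decisions\n- Consider regulatory reporting obligations"),
  ("aerospace",
   "\n\nAerospace Regulatory Advisory:\n- Ensure all safety requirements are fully addressed\n- Maintain documentation of testing and verification\n- Consider certification requirements early in development"),
  ("technology",
   "\n\nTechnology Regulatory Advisory:\n- Address data privacy and security requirements\n- Consider cross-jurisdictional compliance obligations\n- Implement monitoring for regulatory changes")]

-- B's 'for d, advisory in ADVISORIES: if d == domain: out += advisory; break'
def pvAdvScan (domain : String) : List (String × String) → String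
  | [] => ""
  | (d, t) :: rest => if d == domain then t else pvAdvScan domain rest

-- B's loop body: one step of the fused pass over (crit, high, seen_high)
def pvStep (st : String × String × Nat) (r : List (String × String)) : String × String × Nat :=
  let rel := pvGet r "relevance"
  if rel == "critical" then
    (st.1 ++ "\n- " ++ pvGet r "code" ++ ": " ++ pvGet r "title" ++ " - This regulation directly applies to your query",
     st.2.1, st.2.2)
  else if rel == "high" then
    if st.2.2 < 3 then (st.1, st.2.1 ++ "\n- " ++ pvGet r "code" ++ ": " ++ pvGet r "title", st.2.2 + 1)
    else (st.1, st.2.1, st.2.2 + 1)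
  else st

def generate_regulatory_guidance_py_alt (query : String) (domain : String) (regulations : List (List (String × String))) : String :=
  if regulations.isEmpty then "No specific regulatory guidance available for this query."
  else
    let st := regulations.foldl pvStep ("", "", 0)
    let crit := st.1
    let high := st.2.1
    let out := "Based on a regulatory analysis in the " ++ domain ++ " domain, the following guidance is provided:"
    let out := if crit == "" then out else out ++ "\n\nCritical Regulatory Considerations:" ++ crit
    let out := if high == "" then out else out ++ "\n\nPrimary Regulatory Considerations:" ++ high
    let out := out ++ pvAdvScan domain pvAdvisories
    out ++ "\n\nGeneral Regulatory Recommendations:\n- Establish a compliance monitoring process\n- Document regulatory interpretations and compliance decisions\n- Consider engaging regulatory specialists for complex matters"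

-- ===== PRECONDITION & SPEC =====
-- Pre_ excludes exactly the inputs on which Python A raises KeyError: a regulation without a
-- "relevance" key, a critical regulation without "code"/"title", or one of the first three
-- high-relevance regulations without "code"/"title".
def Pre_generate_regulatory_guidance_py (query : String) (domain : String) (regulations : List (List (String × String))) : Prop :=
  (∀ r ∈ regulations, pvHas r "relevance" = true ∧
      (pvGet r "relevance" = "critical" → pvHas r "code" = true ∧ pvHas r "title" = true)) ∧
  (∀ r ∈ (regulations.filter (fun r => pvGet r "relevance" == "high")).take 3,
      pvHas r "code" = true ∧ pvHas r "title" = true)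
instance (query : String) (domain : String) (regulations : List (List (String × String))) : Decidable (Pre_generate_regulatory_guidance_py query domain regulations) := by unfold Pre_generate_regulatory_guidance_py; infer_instance

def pvWitness_generate_regulatory_guidance_py : String × String × (List (List (String × String))) :=
  ("q", "finance", [[("relevance", "critical"), ("code", "R1"), ("title", "Rule 1")],
                    [("relevance", "high"), ("code", "R2"), ("title", "Rule 2")]])

def Spec_generate_regulatory_guidance_py (query : String) (domain : String) (regulations : List (List (String × String))) (out : String) : Prop := out = generate_regulatory_guidance_py_alt query domain regulations
instance (query : String) (domain : String) (regulations : List (List (String × String))) (out : String) : Decidable (Spec_generate_regulatory_guidance_py query domain regulations out) := by unfold Spec_generate_regulatory_guidance_py; infer_instance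

-- ===== CLAIM (what is proved, stated in full; the proofs are below) =====
def Claim_equal_generate_regulatory_guidance_py : Prop := ∀ (query : String) (domain : String) (regulations : List (List (String × String))), Dom_generate_regulatory_guidance_py query domain regulations → Pre_generate_regulatory_guidance_py query domain regulations → Spec_generate_regulatory_guidance_py query domain regulations (generate_regulatory_guidance_py query domain regulations)

-- ===== LEMMAS AND PROOFS =====

theorem pv_witness_ok :
    Dom_generate_regulatory_guidance_py (pvWitness_generate_regulatory_guidance_py.1) (pvWitness_generate_regulatory_guidance_py.2.1) (pvWitness_generate_regulatory_guidance_py.2.2) ∧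
    Pre_generate_regulatory_guidance_py (pvWitness_generate_regulatory_guidance_py.1) (pvWitness_generate_regulatory_guidance_py.2.1) (pvWitness_generate_regulatory_guidance_py.2.2) := by
  constructor <;> decide

-- "\n"-prefixed concatenation of a list of lines (proof-side mirror of what join does after the head)
def nlcat (l : List String) : String := l.foldr (fun s acc => "\n" ++ s ++ acc) ""

theorem nlcat_nil : nlcat [] = "" := rfl

theorem nlcat_cons (s : String) (l : List String) : nlcat (s :: l) = "\n" ++ s ++ nlcat l := rfl

theorem nlcat_append (l₁ l₂ : List String) : nlcat (l₁ ++ l₂) = nlcat l₁ ++ nlcat l₂ := by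
  induction l₁ with
  | nil => simp [nlcat_nil, nlcat_cons]
  | cons a t ih => simp [nlcat_cons, ih, String.append_assoc]

-- merging two adjacent string literals under right association
theorem str_merge (a b c : String) (h : a ++ b = c) (s : String) : a ++ (b ++ s) = c ++ s := by
  rw [← String.append_assoc, h]

theorem join_eq_nlcat (a : String) (l : List String) :
    PySem.Str.join "\n" (a :: l) = a ++ nlcat l := by
  induction l generalizing a with
  | nil => simp [PySem.Str.join, PySem.Chars.join_singleton, nlcat_nil]
  | cons b t ih =>
    have h : PySem.Str.join "\n" (a :: b :: t) = a ++ "\n" ++ PySem.Str.join "\n" (b :: t) := by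
      show String.ofList _ = _
      rw [List.map_cons, List.map_cons, PySem.Chars.join_cons_cons, String.ofList_append,
        String.ofList_append, String.ofList_toList, String.ofList_toList]
      rfl
    rw [h, ih, nlcat_cons]
    simp [String.append_assoc]

theorem nlcat_ne_empty (s : String) (l : List String) : nlcat (s :: l) ≠ "" := by
  rw [nlcat_cons]
  intro h
  have := congrArg String.toList h
  simp at this

-- the fused pass computes exactly the nlcat of A's two section bodies
theorem pv_fold_eq (l : List (List (String × String))) (c h : String) (n : Nat) :
    l.foldl pvStep (c, h, n)
      = (c ++ nlcat ((l.filter (fun r => pvGet r "relevance" == "critical")).map (fun reg =>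
            "- " ++ pvGet reg "code" ++ ": " ++ pvGet reg "title" ++ " - This regulation directly applies to your query")),
         h ++ nlcat (((l.filter (fun r => pvGet r "relevance" == "high")).take (3 - n)).map (fun reg =>
            "- " ++ pvGet reg "code" ++ ": " ++ pvGet reg "title")),
         n + (l.filter (fun r => pvGet r "relevance" == "high")).length) := by
  induction l generalizing c h n with
  | nil => simp [nlcat_nil]
  | cons r t ih =>
    by_cases hc : pvGet r "relevance" = "critical"
    · simp only [List.foldl_cons, pvStep, hc]
      rw [ih]
      simp [hc, nlcat_cons, String.append_assoc, str_merge "\n" "- " "\n- " rfl]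
    · by_cases hh : pvGet r "relevance" = "high"
      · by_cases hn : n < 3
        · have h3 : 3 - n = (3 - (n + 1)) + 1 := by omega
          simp only [List.foldl_cons, pvStep, hc, hh]
          rw [if_neg (by simp [hc]), if_pos (by simp [hh]), if_pos hn, ih]
          rw [h3]
          simp [hh, hc, List.take_succ_cons, nlcat_cons, String.append_assoc,
            str_merge "\n" "- " "\n- " rfl]
          omega
        · have h3 : 3 - n = 0 := by omega
          have h4 : 3 - (n + 1) = 0 := by omega
          simp only [List.foldl_cons, pvStep, hc, hh]
          rw [if_neg (by simp [hc]), if_pos (by simp [hh]), if_neg hn, ih]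
          simp [hh, hc, h3, h4, nlcat_nil]
          omega
      · simp only [List.foldl_cons, pvStep]
        rw [if_neg (by simp [hc]), if_neg (by simp [hh]), ih]
        simp [hh, hc]

-- A's advisory if/elif chain as "append an extra list" (proof-side)
def pvAdvExtra (domain : String) : List String :=
  if domain == "healthcare" then
    ["\nHealthcare Regulatory Advisory:",
     "- Ensure all patient data handling complies with privacy regulations",
     "- Maintain documentation of compliance efforts",
     "- Consider consulting with a healthcare compliance specialist"]
  else if domain == "finance" then
    ["\nFinancial Regulatory Advisory:",
     "- Verify all disclosure requirements are satisfied",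
     "- Maintain audit trail of compliance decisions",
     "- Consider regulatory reporting obligations"]
  else if domain == "aerospace" then
    ["\nAerospace Regulatory Advisory:",
     "- Ensure all safety requirements are fully addressed",
     "- Maintain documentation of testing and verification",
     "- Consider certification requirements early in development"]
  else if domain == "technology" then
    ["\nTechnology Regulatory Advisory:",
     "- Address data privacy and security requirements",
     "- Consider cross-jurisdictional compliance obligations",
     "- Implement monitoring for regulatory changes"]
  else []

theorem pv_adv_append (domain : String) (g : List String) :
    (if domain == "healthcare" then
        g ++ ["\nHealthcare Regulatory Advisory:",
          "- Ensure all patient data handling complies with privacy regulations",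
          "- Maintain documentation of compliance efforts",
          "- Consider consulting with a healthcare compliance specialist"]
      else if domain == "finance" then
        g ++ ["\nFinancial Regulatory Advisory:",
          "- Verify all disclosure requirements are satisfied",
          "- Maintain audit trail of compliance decisions",
          "- Consider regulatory reporting obligations"]
      else if domain == "aerospace" then
        g ++ ["\nAerospace Regulatory Advisory:",
          "- Ensure all safety requirements are fully addressed",
          "- Maintain documentation of testing and verification",
          "- Consider certification requirements early in development"]
      else if domain == "technology" then
        g ++ ["\nTechnology Regulatory Advisory:",
          "- Address data privacy and security requirements",
          "- Consider cross-jurisdictional compliance obligations",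
          "- Implement monitoring for regulatory changes"]
      else g)
      = g ++ pvAdvExtra domain := by
  unfold pvAdvExtra
  split_ifs <;> simp

-- the nlcat of A's advisory extra equals B's table scan
theorem pv_adv_scan (domain : String) :
    nlcat (pvAdvExtra domain) = pvAdvScan domain pvAdvisories := by
  by_cases h1 : domain = "healthcare"
  · subst h1; simp [pvAdvExtra, pvAdvScan, pvAdvisories, nlcat_cons, nlcat_nil]
  by_cases h2 : domain = "finance"
  · subst h2; simp [pvAdvExtra, pvAdvScan, pvAdvisories, nlcat_cons, nlcat_nil]
  by_cases h3 : domain = "aerospace"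
  · subst h3; simp [pvAdvExtra, pvAdvScan, pvAdvisories, nlcat_cons, nlcat_nil]
  by_cases h4 : domain = "technology"
  · subst h4; simp [pvAdvExtra, pvAdvScan, pvAdvisories, nlcat_cons, nlcat_nil]
  · have e1 : ("healthcare" == domain) = false := by simp [Ne.symm h1]
    have e2 : ("finance" == domain) = false := by simp [Ne.symm h2]
    have e3 : ("aerospace" == domain) = false := by simp [Ne.symm h3]
    have e4 : ("technology" == domain) = false := by simp [Ne.symm h4]
    simp [pvAdvExtra, pvAdvScan, pvAdvisories, h1, h2, h3, h4, e1, e2, e3, e4, nlcat_nil]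

-- "append header and lines if the section list is nonempty" as "append an extra list"
theorem pv_sec_append {b : Bool} (g : List String) (hdr : String) (lines : List String) :
    (if b then g else g ++ [hdr] ++ lines) = g ++ (if b then [] else hdr :: lines) := by
  cases b <;> simp

-- B's general-recommendations tail, as the nlcat of A's four general lines
theorem pv_gen :
    nlcat ["\nGeneral Regulatory Recommendations:",
      "- Establish a compliance monitoring process",
      "- Document regulatory interpretations and compliance decisions",
      "- Consider engaging regulatory specialists for complex matters"]
      = "\n\nGeneral Regulatory Recommendations:\n- Establish a compliance monitoring process\n- Document regulatory interpretations and compliance decisions\n- Consider engaging regulatory specialists for complex matters" := by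
  simp [nlcat_cons, nlcat_nil]

-- ===== VERDICT (by name: the statement is the Claim_ definition above) =====
theorem generate_regulatory_guidance_py_spec : Claim_equal_generate_regulatory_guidance_py := by
  intro query domain regulations _ _
  unfold Spec_generate_regulatory_guidance_py
  unfold generate_regulatory_guidance_py generate_regulatory_guidance_py_alt
  by_cases hemp : regulations.isEmpty
  · simp [hemp]
  · simp only [hemp, Bool.false_eq_true, if_false]
    rw [pv_fold_eq, pv_adv_append, pv_sec_append, pv_sec_append]
    generalize regulations.filter (fun r => pvGet r "relevance" == "critical") = CR
    generalize regulations.filter (fun r => pvGet r "relevance" == "high") = HR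
    simp only [List.singleton_append, List.cons_append, List.append_assoc, List.nil_append]
    rw [join_eq_nlcat]
    simp only [nlcat_append, String.empty_append, Nat.sub_zero, Nat.zero_add]
    rw [pv_adv_scan, ← pv_gen]
    cases CR with
    | nil =>
      cases HR with
      | nil => simp [nlcat_nil, String.append_assoc]
      | cons r t =>
        have hne : nlcat (((r :: t).take 3).map (fun reg => "- " ++ pvGet reg "code" ++ ": " ++ pvGet reg "title")) ≠ "" := by
          simp only [List.take_succ_cons, List.map_cons]
          exact nlcat_ne_empty _ _
        simp [nlcat_nil, nlcat_cons, hne, String.append_assoc,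
          str_merge "\n" "\nPrimary Regulatory Considerations:" "\n\nPrimary Regulatory Considerations:" rfl,
          str_merge "\n" "- " "\n- " rfl, str_merge " domain, the following guidance is provided:" "\n\nPrimary Regulatory Considerations:" " domain, the following guidance is provided:\n\nPrimary Regulatory Considerations:" rfl]
    | cons c ct =>
      have hcne : nlcat ((c :: ct).map (fun reg => "- " ++ pvGet reg "code" ++ ": " ++ pvGet reg "title" ++ " - This regulation directly applies to your query")) ≠ "" := by
        simp only [List.map_cons]
        exact nlcat_ne_empty _ _
      cases HR with
      | nil =>
        simp [nlcat_nil, nlcat_cons, hcne, String.append_assoc,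
          str_merge "\n" "\nCritical Regulatory Considerations:" "\n\nCritical Regulatory Considerations:" rfl,
          str_merge "\n" "- " "\n- " rfl, str_merge " domain, the following guidance is provided:" "\n\nCritical Regulatory Considerations:" " domain, the following guidance is provided:\n\nCritical Regulatory Considerations:" rfl]
      | cons r t =>
        have hne : nlcat (((r :: t).take 3).map (fun reg => "- " ++ pvGet reg "code" ++ ": " ++ pvGet reg "title")) ≠ "" := by
          simp only [List.take_succ_cons, List.map_cons]
          exact nlcat_ne_empty _ _
        simp [nlcat_cons, hcne, hne, String.append_assoc,
          str_merge "\n" "\nCritical Regulatory Considerations:" "\n\nCritical Regulatory Considerations:" rfl,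
          str_merge "\n" "\nPrimary Regulatory Considerations:" "\n\nPrimary Regulatory Considerations:" rfl,
          str_merge "\n" "- " "\n- " rfl, str_merge " domain, the following guidance is provided:" "\n\nCritical Regulatory Considerations:" " domain, the following guidance is provided:\n\nCritical Regulatory Considerations:" rfl, str_merge " domain, the following guidance is provided:" "\n\nPrimary Regulatory Considerations:" " domain, the following guidance is provided:\n\nPrimary Regulatory Considerations:" rfl]
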